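-- pv_equiv track=rewrite | github.com/MrBrantCode/unitest_baseline | mut_generate/mist_train_taco/taco_1673/solution.py | calculate_max_satisfaction
-- ===== SOURCE A (Python) =====
-- import collections
--
-- def calculate_max_satisfaction(datasets):
--     results = []
--
--     for dataset in datasets:
--         ms = []
--         for guy in dataset:
--             M, L, dates = guy
--             b = 0
--             for (s, e) in dates:
--                 for i in range(s, e):
--                     b |= 2 ** (i - 6)
--             ms.append((L, b))
--
--         d = collections.defaultdict(int)
--         d[0] = 0
--         for (L, b) in ms:
--             for (k, v) in list(d.items()):
--                 if b & k > 0: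
--                     continue
--                 if d[b | k] < v + L:
--                     d[b | k] = v + L
--
--         results.append(max(d.values()))
--
--     return results
-- ===== SOURCE B (Python) =====
-- def calculate_max_satisfaction(datasets):
--     def mask_of(dates):
--         b = 0
--         for (s, e) in dates:
--             for i in range(s, e):
--                 b |= 2 ** (i - 6)
--         return b
--
--     results = []
--     for dataset in datasets:
--         guys = [(L, mask_of(dates)) for (M, L, dates) in dataset]
--
--         def solve(i, used):
--             if i == len(guys):
--                 return 0
--             L, b = guys[i]
--             best = solve(i + 1, used)
--             if b & used == 0:
--                 best = max(best, L + solve(i + 1, used | b))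
--             return best
--
--         results.append(solve(0, 0))
--     return results
-- ===== Notes on version B (the rewrite author's own statement) =====
-- stated objective: alternative
-- what changed: The reachable-mask dict DP (snapshot iteration over a growing defaultdict) is replaced by a plain include/exclude recursion over the (L, mask) list that threads the used-bits mask; the bitmask-building phase is kept.
import Mathlib
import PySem

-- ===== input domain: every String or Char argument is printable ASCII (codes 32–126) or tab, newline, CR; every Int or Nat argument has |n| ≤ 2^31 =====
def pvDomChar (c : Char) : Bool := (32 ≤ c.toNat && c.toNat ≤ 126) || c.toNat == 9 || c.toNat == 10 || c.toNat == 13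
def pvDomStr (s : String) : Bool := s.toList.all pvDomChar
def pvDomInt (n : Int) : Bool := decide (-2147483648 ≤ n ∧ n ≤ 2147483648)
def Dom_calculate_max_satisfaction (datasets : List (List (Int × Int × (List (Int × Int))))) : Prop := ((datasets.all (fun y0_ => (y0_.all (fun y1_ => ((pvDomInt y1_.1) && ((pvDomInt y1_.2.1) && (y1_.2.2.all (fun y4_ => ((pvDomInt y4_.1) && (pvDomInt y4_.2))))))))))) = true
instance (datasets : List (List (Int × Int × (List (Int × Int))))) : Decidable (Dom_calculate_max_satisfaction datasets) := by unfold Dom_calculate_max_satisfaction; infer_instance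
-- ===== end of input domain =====

-- B keeps A's bitmask-building phase but replaces the snapshot-iteration defaultdict DP by a
-- plain include/exclude recursion over the (L, mask) list (objective: alternative, not faster).

-- ===== PORT A =====
-- one inner-loop body of A: 'if b & k > 0: continue; if d[b|k] < v + L: d[b|k] = v + L'.
-- The defaultdict read d[b|k] materialises the key with default 0 before the comparison:
-- modelled by the first insert of 'cur'.
def pvF (L b : Int) (d : PySem.Dict Int Int) (kv : Int × Int) : PySem.Dict Int Int :=
  if PySem.Int.band b kv.1 > 0 then d
  else
    let cur := d.getD (PySem.Int.bor b kv.1) 0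
    let d1 := d.insert (PySem.Int.bor b kv.1) cur
    if cur < kv.2 + L then d1.insert (PySem.Int.bor b kv.1) (kv.2 + L) else d1

-- 'for (k, v) in list(d.items()):' — s is the snapshot taken at loop entry, d is threaded
def pvDpStep (L b : Int) (s : List (Int × Int)) (d : PySem.Dict Int Int) : PySem.Dict Int Int :=
  s.foldl (pvF L b) d

-- 'for (L, b) in ms:'
def pvDpAll (ms : List (Int × Int)) (d : PySem.Dict Int Int) : PySem.Dict Int Int :=
  ms.foldl (fun d lb => pvDpStep lb.1 lb.2 d.items d) d

-- max(d.values()); the none case is unreachable (key 0 is always present, so values ≠ [])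
def pvMaxA (d : PySem.Dict Int Int) : Int :=
  (PySem.List.max? d.values (fun x => x)).getD 0

def calculate_max_satisfaction (datasets : List (List (Int × Int × (List (Int × Int))))) : List Int :=
  datasets.foldl (fun results dataset =>
    results ++ [pvMaxA (pvDpAll
      -- ms.append((L, b)) with b built by 'for (s, e) in dates: for i in range(s, e): b |= 2 ** (i - 6)'
      -- (2 ** (i - 6) as a bit index via .toNat: exact since Pre_ gives i ≥ 6 on every executed iteration)
      (dataset.foldl (fun ms guy =>
        ms ++ [(guy.2.1, guy.2.2.foldl (fun b se =>
          (PySem.List.pyRange se.1 se.2 1).foldl (fun b i => PySem.Int.bor b (2 ^ (i - 6).toNat)) b) 0)]) [])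
      (PySem.Dict.empty.insert 0 0))]) []

-- ===== PORT B =====
-- mask_of(dates): same loop as A's bitmask phase (B keeps it); .toNat exact under Pre_ as above
def pvMaskOf (dates : List (Int × Int)) : Int :=
  dates.foldl (fun b se =>
    (PySem.List.pyRange se.1 se.2 1).foldl (fun b i => PySem.Int.bor b (2 ^ (i - 6).toNat)) b) 0

-- solve(i, used): recursion over the guys list (index i becomes the structural tail)
def pvSolve : List (Int × Int) → Int → Int
  | [], _ => 0
  | g :: rest, used =>
    let best := pvSolve rest used
    if PySem.Int.band g.2 used == 0 then max best (g.1 + pvSolve rest (PySem.Int.bor used g.2))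
    else best

def calculate_max_satisfaction_alt (datasets : List (List (Int × Int × (List (Int × Int))))) : List Int :=
  datasets.foldl (fun results dataset =>
    results ++ [pvSolve (dataset.map (fun g => (g.2.1, pvMaskOf g.2.2))) 0]) []

-- ===== PRECONDITION & SPEC =====
-- Pre_ excludes exactly the inputs where Python A raises: a date pair with s < e and s < 6 makes
-- range(s, e) reach i < 6, where 2 ** (i - 6) is a float and 'b |= float' is a TypeError.
def Pre_calculate_max_satisfaction (datasets : List (List (Int × Int × (List (Int × Int))))) : Prop :=
  ∀ ds ∈ datasets, ∀ g ∈ ds, ∀ se ∈ g.2.2, se.1 < se.2 → 6 ≤ se.1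
instance (datasets : List (List (Int × Int × (List (Int × Int))))) : Decidable (Pre_calculate_max_satisfaction datasets) := by
  unfold Pre_calculate_max_satisfaction; infer_instance

def pvWitness_calculate_max_satisfaction : (List (List (Int × Int × (List (Int × Int))))) :=
  [[(1, 5, [(6, 8)]), (2, 3, [(7, 9)])]]

def Spec_calculate_max_satisfaction (datasets : List (List (Int × Int × (List (Int × Int))))) (out : List Int) : Prop := out = calculate_max_satisfaction_alt datasets
instance (datasets : List (List (Int × Int × (List (Int × Int))))) (out : List Int) : Decidable (Spec_calculate_max_satisfaction datasets out) := by unfold Spec_calculate_max_satisfaction; infer_instance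

-- ===== CLAIM (what is proved, stated in full; the proofs are below) =====
def Claim_equal_calculate_max_satisfaction : Prop := ∀ (datasets : List (List (Int × Int × (List (Int × Int))))), Dom_calculate_max_satisfaction datasets → Pre_calculate_max_satisfaction datasets → Spec_calculate_max_satisfaction datasets (calculate_max_satisfaction datasets)

-- ===== LEMMAS AND PROOFS =====

-- ---- bit-level facts (masks are nonnegative; transfer PySem.Int.band/bor to Nat) ----

-- m₁'s bits are contained in m₂'s
def pvSub (m₁ m₂ : Int) : Prop := PySem.Int.band m₁ m₂ = m₁

lemma pvNat_sub_or (m₁ m₂ b : Nat) (h : m₁ &&& m₂ = m₁) :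
    (m₁ ||| b) &&& (m₂ ||| b) = m₁ ||| b := by
  apply Nat.eq_of_testBit_eq; intro i
  have h1 := congrArg (fun n => n.testBit i) h
  simp only [Nat.testBit_and, Nat.testBit_or] at h1 ⊢
  cases hm1 : m₁.testBit i <;> cases hm2 : m₂.testBit i <;> cases hb2 : b.testBit i <;> simp_all

lemma pvNat_and_zero (x m₁ m₂ : Nat) (h : m₁ &&& m₂ = m₁) (h0 : x &&& m₂ = 0) :
    x &&& m₁ = 0 := by
  apply Nat.eq_of_testBit_eq; intro i
  have h1 := congrArg (fun n => n.testBit i) h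
  have h2 := congrArg (fun n => n.testBit i) h0
  simp only [Nat.testBit_and, Nat.zero_testBit] at h1 h2 ⊢
  cases hx : x.testBit i <;> cases hm1 : m₁.testBit i <;> cases hm2 : m₂.testBit i <;> simp_all

lemma pvBor_nonneg {a b : Int} (ha : 0 ≤ a) (hb : 0 ≤ b) : 0 ≤ PySem.Int.bor a b := by
  rw [PySem.Int.bor_of_nonneg ha hb]; exact Int.natCast_nonneg _

lemma pvSub_zero (m : Int) : pvSub 0 m := by
  unfold pvSub; rw [PySem.Int.band_comm]; simp

lemma pvSub_bor {m₁ m₂ b : Int} (h₁ : 0 ≤ m₁) (h₂ : 0 ≤ m₂) (hb : 0 ≤ b)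
    (h : pvSub m₁ m₂) : pvSub (PySem.Int.bor m₁ b) (PySem.Int.bor m₂ b) := by
  unfold pvSub at h ⊢
  rw [PySem.Int.band_of_nonneg h₁ h₂] at h
  have hN : m₁.toNat &&& m₂.toNat = m₁.toNat := by
    have := congrArg Int.toNat h; simpa using this
  rw [PySem.Int.bor_of_nonneg h₁ hb, PySem.Int.bor_of_nonneg h₂ hb]
  rw [PySem.Int.band_natCast]
  exact congrArg _ (pvNat_sub_or _ _ _ hN)

lemma pvBand_zero_of_sub {x m₁ m₂ : Int} (hx : 0 ≤ x) (h₁ : 0 ≤ m₁) (h₂ : 0 ≤ m₂)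
    (h : pvSub m₁ m₂) (h0 : PySem.Int.band x m₂ = 0) : PySem.Int.band x m₁ = 0 := by
  unfold pvSub at h
  rw [PySem.Int.band_of_nonneg h₁ h₂] at h
  have hN : m₁.toNat &&& m₂.toNat = m₁.toNat := by
    have := congrArg Int.toNat h; simpa using this
  rw [PySem.Int.band_of_nonneg hx h₂] at h0
  have h0N : x.toNat &&& m₂.toNat = 0 := by exact_mod_cast h0
  rw [PySem.Int.band_of_nonneg hx h₁]
  exact_mod_cast congrArg (Nat.cast : Nat → Int) (pvNat_and_zero _ _ _ hN h0N)

-- ---- masks are nonnegative ----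

lemma pvInnerFold_nonneg (l : List Int) (b : Int) (hb : 0 ≤ b) :
    0 ≤ l.foldl (fun b i => PySem.Int.bor b (2 ^ (i - 6).toNat)) b := by
  induction l generalizing b with
  | nil => simpa using hb
  | cons a l ih =>
    simp only [List.foldl_cons]
    exact ih _ (pvBor_nonneg hb (by positivity))

lemma pvMaskFold_nonneg (dates : List (Int × Int)) (b : Int) (hb : 0 ≤ b) :
    0 ≤ dates.foldl (fun b se =>
      (PySem.List.pyRange se.1 se.2 1).foldl (fun b i => PySem.Int.bor b (2 ^ (i - 6).toNat)) b) b := by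
  induction dates generalizing b with
  | nil => simpa using hb
  | cons a l ih =>
    simp only [List.foldl_cons]
    exact ih _ (pvInnerFold_nonneg _ _ hb)

lemma pvMaskOf_nonneg (dates : List (Int × Int)) : 0 ≤ pvMaskOf dates := by
  unfold pvMaskOf; exact pvMaskFold_nonneg _ _ le_rfl

-- ---- pvSolve facts ----

lemma pvSolve_le_cons (g : Int × Int) (rest : List (Int × Int)) (u : Int) :
    pvSolve rest u ≤ pvSolve (g :: rest) u := by
  simp only [pvSolve]
  split
  · exact le_max_left _ _
  · exact le_rfl

lemma pvSolve_take (g : Int × Int) (rest : List (Int × Int)) (u : Int)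
    (h : PySem.Int.band g.2 u = 0) :
    g.1 + pvSolve rest (PySem.Int.bor u g.2) ≤ pvSolve (g :: rest) u := by
  simp only [pvSolve, h]
  simp

lemma pvSolve_anti (rest : List (Int × Int)) (hm : ∀ g ∈ rest, 0 ≤ g.2) :
    ∀ u₁ u₂ : Int, 0 ≤ u₁ → 0 ≤ u₂ → pvSub u₁ u₂ → pvSolve rest u₂ ≤ pvSolve rest u₁ := by
  induction rest with
  | nil => intro u₁ u₂ _ _ _; simp [pvSolve]
  | cons g r ih =>
    intro u₁ u₂ hu₁ hu₂ hs
    have hg2 : 0 ≤ g.2 := hm g List.mem_cons_self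
    have hr : ∀ x ∈ r, 0 ≤ x.2 := fun x hx => hm x (List.mem_cons_of_mem _ hx)
    simp only [pvSolve]
    by_cases hc2 : PySem.Int.band g.2 u₂ = 0
    · have hc1 : PySem.Int.band g.2 u₁ = 0 := pvBand_zero_of_sub hg2 hu₁ hu₂ hs hc2
      simp only [hc2, hc1, beq_self_eq_true, if_true]
      exact max_le_max (ih hr _ _ hu₁ hu₂ hs)
        (by have := ih hr _ _ (pvBor_nonneg hu₁ hg2) (pvBor_nonneg hu₂ hg2)
              (pvSub_bor hu₁ hu₂ hg2 hs)
            omega)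
    · have hbeq : (PySem.Int.band g.2 u₂ == 0) = false := by simpa using hc2
      rw [hbeq]
      simp only [Bool.false_eq_true, if_false]
      have base := ih hr _ _ hu₁ hu₂ hs
      split
      · exact base.trans (le_max_left _ _)
      · exact base

-- ---- dict step facts ----

lemma pvF_eq (L b : Int) (d : PySem.Dict Int Int) (kv : Int × Int) :
    pvF L b d kv = if PySem.Int.band b kv.1 > 0 then d
      else d.insert (PySem.Int.bor b kv.1)
        (max (d.getD (PySem.Int.bor b kv.1) 0) (kv.2 + L)) := by
  unfold pvF
  by_cases hgt : PySem.Int.band b kv.1 > 0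
  · simp [hgt]
  · simp only [hgt, if_false]
    by_cases h2 : d.getD (PySem.Int.bor b kv.1) 0 < kv.2 + L
    · simp only [h2, if_true, PySem.Dict.insert_insert_self]
      congr 1
      exact (max_eq_right (le_of_lt h2)).symm
    · simp only [h2, if_false]
      congr 1
      exact (max_eq_left (by omega)).symm

lemma pvF_getD_le (L b : Int) (d : PySem.Dict Int Int) (kv : Int × Int) (j : Int) :
    d.getD j 0 ≤ (pvF L b d kv).getD j 0 := by
  rw [pvF_eq]
  split
  · exact le_rfl
  · rw [PySem.Dict.getD_insert]
    split_ifs with hj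
    · subst hj; exact le_max_left _ _
    · exact le_rfl

lemma pvF_contains (L b : Int) (d : PySem.Dict Int Int) (kv : Int × Int) (j : Int)
    (h : d.contains j = true) : (pvF L b d kv).contains j = true := by
  rw [pvF_eq]
  split
  · exact h
  · rw [PySem.Dict.contains_insert, h]; simp

lemma pvF_nodup (L b : Int) (d : PySem.Dict Int Int) (kv : Int × Int)
    (h : d.keys.Nodup) : (pvF L b d kv).keys.Nodup := by
  rw [pvF_eq]
  split
  · exact h
  · exact PySem.Dict.nodup_keys_insert _ _ _ h

lemma pvDpStep_getD_le (L b : Int) (s : List (Int × Int)) (d : PySem.Dict Int Int) (j : Int) :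
    d.getD j 0 ≤ (pvDpStep L b s d).getD j 0 := by
  unfold pvDpStep
  induction s generalizing d with
  | nil => exact le_rfl
  | cons a s ih =>
    simp only [List.foldl_cons]
    exact (pvF_getD_le L b d a j).trans (ih _)

lemma pvDpStep_contains (L b : Int) (s : List (Int × Int)) (d : PySem.Dict Int Int) (j : Int)
    (h : d.contains j = true) : (pvDpStep L b s d).contains j = true := by
  unfold pvDpStep at *
  induction s generalizing d with
  | nil => exact h
  | cons a s ih =>
    simp only [List.foldl_cons]
    exact ih _ (pvF_contains L b d a j h)

lemma pvDpStep_nodup (L b : Int) (s : List (Int × Int)) (d : PySem.Dict Int Int)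
    (h : d.keys.Nodup) : (pvDpStep L b s d).keys.Nodup := by
  unfold pvDpStep at *
  induction s generalizing d with
  | nil => exact h
  | cons a s ih =>
    simp only [List.foldl_cons]
    exact ih _ (pvF_nodup L b d a h)

lemma pvDpStep_reach (L b k v : Int) :
    ∀ (s : List (Int × Int)) (d : PySem.Dict Int Int), (k, v) ∈ s → ¬ (PySem.Int.band b k > 0) →
      v + L ≤ (pvDpStep L b s d).getD (PySem.Int.bor b k) 0 ∧
      (pvDpStep L b s d).contains (PySem.Int.bor b k) = true := by
  intro s
  induction s with
  | nil => intro d hmem _; exact absurd hmem List.not_mem_nil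
  | cons a s ih =>
    intro d hmem hnot
    have hstep : pvDpStep L b (a :: s) d = pvDpStep L b s (pvF L b d a) := rfl
    rw [hstep]
    rcases List.mem_cons.mp hmem with heq | hmem'
    · subst heq
      have hI : v + L ≤ (pvF L b d (k, v)).getD (PySem.Int.bor b k) 0 ∧
          (pvF L b d (k, v)).contains (PySem.Int.bor b k) = true := by
        rw [pvF_eq]
        simp only [hnot, if_false]
        constructor
        · rw [PySem.Dict.getD_insert]
          rw [if_pos rfl]
          exact le_max_right _ _
        · rw [PySem.Dict.contains_insert]; simp
      exact ⟨hI.1.trans (pvDpStep_getD_le L b s _ _), pvDpStep_contains L b s _ _ hI.2⟩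
    · exact ih _ hmem' hnot

lemma pvDpStep_ub (L b : Int) (rest : List (Int × Int)) (T : Int)
    (hb : 0 ≤ b) (hrm : ∀ g ∈ rest, 0 ≤ g.2) (hT0 : pvSolve rest 0 ≤ T) :
    ∀ (s : List (Int × Int)) (d : PySem.Dict Int Int),
      (∀ kv ∈ s, 0 ≤ kv.1 ∧ kv.2 + pvSolve ((L, b) :: rest) kv.1 ≤ T) →
      (∀ kv ∈ d.items, 0 ≤ kv.1 ∧ kv.2 + pvSolve rest kv.1 ≤ T) →
      ∀ kv ∈ (pvDpStep L b s d).items, 0 ≤ kv.1 ∧ kv.2 + pvSolve rest kv.1 ≤ T := by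
  intro s
  induction s with
  | nil => intro d _ hd; exact hd
  | cons a s ih =>
    intro d hs hd
    have ha := hs a List.mem_cons_self
    have hs' : ∀ kv ∈ s, 0 ≤ kv.1 ∧ kv.2 + pvSolve ((L, b) :: rest) kv.1 ≤ T :=
      fun kv hkv => hs kv (List.mem_cons_of_mem _ hkv)
    have hstep : pvDpStep L b (a :: s) d = pvDpStep L b s (pvF L b d a) := rfl
    rw [hstep]
    apply ih _ hs'
    intro kv hkv
    rw [pvF_eq] at hkv
    by_cases hgt : PySem.Int.band b a.1 > 0
    · rw [if_pos hgt] at hkv; exact hd kv hkv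
    · rw [if_neg hgt] at hkv
      have hz : PySem.Int.band b a.1 = 0 := by
        have := PySem.Int.band_nonneg_of_nonneg_left a.1 hb; omega
      have hkey : (0:Int) ≤ PySem.Int.bor b a.1 := pvBor_nonneg hb ha.1
      rcases (PySem.Dict.mem_items_insert _ _ _ _).mp hkv with heq | ⟨hmem, _⟩
      · subst heq
        refine ⟨hkey, ?_⟩
        dsimp only
        rcases max_choice (d.getD (PySem.Int.bor b a.1) 0) (a.2 + L) with hmx | hmx <;> rw [hmx]
        · cases hc : d.contains (PySem.Int.bor b a.1)
          · rw [PySem.Dict.getD_of_not_contains _ _ hc]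
            have h1 : pvSolve rest (PySem.Int.bor b a.1) ≤ pvSolve rest 0 :=
              pvSolve_anti rest hrm 0 _ le_rfl hkey (pvSub_zero _)
            omega
          · rw [PySem.Dict.contains_eq_isSome_get?] at hc
            obtain ⟨u, hu⟩ := Option.isSome_iff_exists.mp hc
            rw [PySem.Dict.getD_of_get?_eq_some _ _ hu]
            exact (hd _ (PySem.Dict.mem_items_of_get?_eq_some _ hu)).2
        · have htake := pvSolve_take (L, b) rest a.1 (by simpa using hz)
          dsimp only at htake
          rw [PySem.Int.bor_comm a.1 b] at htake
          have ha2 := ha.2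
          omega
      · exact hd kv hmem

lemma pvDpAll_contains (j : Int) :
    ∀ (ms : List (Int × Int)) (d : PySem.Dict Int Int), d.contains j = true →
      (pvDpAll ms d).contains j = true := by
  intro ms
  induction ms with
  | nil => intro d h; exact h
  | cons g ms ih =>
    intro d h
    have hcons : pvDpAll (g :: ms) d = pvDpAll ms (pvDpStep g.1 g.2 d.items d) := rfl
    rw [hcons]
    exact ih _ (pvDpStep_contains _ _ _ _ _ h)

lemma pvDpAll_ub (T : Int) :
    ∀ (rest : List (Int × Int)) (d : PySem.Dict Int Int),
      (∀ g ∈ rest, 0 ≤ g.2) → pvSolve rest 0 ≤ T →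
      (∀ kv ∈ d.items, 0 ≤ kv.1 ∧ kv.2 + pvSolve rest kv.1 ≤ T) →
      ∀ kv ∈ (pvDpAll rest d).items, kv.2 ≤ T := by
  intro rest
  induction rest with
  | nil =>
    intro d _ _ hd kv hkv
    have := (hd kv hkv).2
    simpa [pvSolve] using this
  | cons g r ih =>
    intro d hms hT hd
    have hb : 0 ≤ g.2 := hms g List.mem_cons_self
    have hr : ∀ x ∈ r, 0 ≤ x.2 := fun x hx => hms x (List.mem_cons_of_mem _ hx)
    have hT' : pvSolve r 0 ≤ T := (pvSolve_le_cons g r 0).trans hT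
    have hcons : pvDpAll (g :: r) d = pvDpAll r (pvDpStep g.1 g.2 d.items d) := rfl
    rw [hcons]
    apply ih _ hr hT'
    apply pvDpStep_ub g.1 g.2 r T hb hr hT' d.items d
    · exact fun kv hkv => hd kv hkv
    · exact fun kv hkv => ⟨(hd kv hkv).1, by
        have h1 := (hd kv hkv).2
        have h2 := pvSolve_le_cons g r kv.1
        omega⟩

lemma pvDpAll_lb :
    ∀ (rest : List (Int × Int)) (d : PySem.Dict Int Int),
      (∀ g ∈ rest, 0 ≤ g.2) → d.keys.Nodup →
      ∀ k v : Int, (k, v) ∈ d.items → 0 ≤ k →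
        v + pvSolve rest k ≤ pvMaxA (pvDpAll rest d) := by
  intro rest
  induction rest with
  | nil =>
    intro d _ hnd k v hkv hk
    have hvmem : v ∈ d.values := List.mem_map.mpr ⟨(k, v), hkv, rfl⟩
    cases hmx : PySem.List.max? d.values (fun x => x) with
    | none =>
      rw [PySem.List.max?_eq_none_iff] at hmx
      rw [hmx] at hvmem; exact absurd hvmem List.not_mem_nil
    | some m =>
      have hle := PySem.List.max?_isMax hmx v hvmem
      have hmv : pvMaxA (pvDpAll [] d) = m := by
        show (PySem.List.max? d.values fun x => x).getD 0 = m
        rw [hmx]; rfl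
      rw [hmv]
      simpa [pvSolve] using hle
  | cons g r ih =>
    intro d hms hnd k v hkv hk
    have hb : 0 ≤ g.2 := hms g List.mem_cons_self
    have hr : ∀ x ∈ r, 0 ≤ x.2 := fun x hx => hms x (List.mem_cons_of_mem _ hx)
    have hnd' := pvDpStep_nodup g.1 g.2 d.items d hnd
    have hcons : pvDpAll (g :: r) d = pvDpAll r (pvDpStep g.1 g.2 d.items d) := rfl
    rw [hcons]
    set d' := pvDpStep g.1 g.2 d.items d with hd'
    have hcont : d.contains k = true :=
      (PySem.Dict.contains_iff_mem_keys _ _).mpr (PySem.Dict.mem_keys_of_mem_items _ hkv)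
    have hcont' : d'.contains k = true := pvDpStep_contains _ _ _ _ _ hcont
    have hsome : (d'.get? k).isSome := by
      rw [← PySem.Dict.contains_eq_isSome_get?]; exact hcont'
    obtain ⟨v', hv'⟩ := Option.isSome_iff_exists.mp hsome
    have hv'mem : (k, v') ∈ d'.items := PySem.Dict.mem_items_of_get?_eq_some _ hv'
    have hvk : d.getD k 0 = v := PySem.Dict.getD_of_mem_items _ hkv hnd 0
    have hge : v ≤ v' := by
      have h1 := pvDpStep_getD_le g.1 g.2 d.items d k
      rw [hvk, PySem.Dict.getD_of_get?_eq_some _ _ hv'] at h1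
      exact h1
    have ihk := ih d' hr hnd' k v' hv'mem hk
    by_cases hc : PySem.Int.band g.2 k = 0
    · have hnot : ¬ (PySem.Int.band g.2 k > 0) := by omega
      obtain ⟨hge2, hcont2⟩ := pvDpStep_reach g.1 g.2 k v d.items d hkv hnot
      have hkeyn : (0:Int) ≤ PySem.Int.bor g.2 k := pvBor_nonneg hb hk
      have hsome2 : (d'.get? (PySem.Int.bor g.2 k)).isSome := by
        rw [← PySem.Dict.contains_eq_isSome_get?]; exact hcont2
      obtain ⟨w, hw⟩ := Option.isSome_iff_exists.mp hsome2
      have hwmem := PySem.Dict.mem_items_of_get?_eq_some _ hw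
      have hge3 : v + g.1 ≤ w := by
        rw [PySem.Dict.getD_of_get?_eq_some _ _ hw] at hge2; exact hge2
      have ihkey := ih d' hr hnd' _ w hwmem hkeyn
      have hsolve : pvSolve (g :: r) k = max (pvSolve r k) (g.1 + pvSolve r (PySem.Int.bor k g.2)) := by
        simp [pvSolve, hc]
      rw [hsolve, PySem.Int.bor_comm k g.2]
      rcases le_total (pvSolve r k) (g.1 + pvSolve r (PySem.Int.bor g.2 k)) with hmax | hmax
      · rw [max_eq_right hmax]; omega
      · rw [max_eq_left hmax]; omega
    · have hsolve : pvSolve (g :: r) k = pvSolve r k := by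
        have hfalse : (PySem.Int.band g.2 k == 0) = false := by simpa using hc
        simp [pvSolve, hfalse]
      rw [hsolve]; omega

lemma pvDataset_eq (guys : List (Int × Int)) (hm : ∀ g ∈ guys, 0 ≤ g.2) :
    pvMaxA (pvDpAll guys (PySem.Dict.empty.insert 0 0)) = pvSolve guys 0 := by
  have hitems : (PySem.Dict.empty.insert 0 0 : PySem.Dict Int Int).items = [((0:Int), (0:Int))] := by decide
  have h00 : ((0:Int), (0:Int)) ∈ (PySem.Dict.empty.insert 0 0 : PySem.Dict Int Int).items := by decide
  have hnd0 : (PySem.Dict.empty.insert 0 0 : PySem.Dict Int Int).keys.Nodup := by decide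
  have hc0 : (PySem.Dict.empty.insert 0 0 : PySem.Dict Int Int).contains 0 = true := by decide
  have hlb := pvDpAll_lb guys _ hm hnd0 0 0 h00 le_rfl
  have hub := pvDpAll_ub (pvSolve guys 0) guys (PySem.Dict.empty.insert 0 0) hm le_rfl (by
    intro kv hkv
    rw [hitems] at hkv
    simp only [List.mem_singleton] at hkv
    subst hkv
    exact ⟨le_rfl, by simp⟩)
  have hcontf := pvDpAll_contains 0 guys _ hc0
  set dfin := pvDpAll guys (PySem.Dict.empty.insert 0 0) with hdfin
  have hsomef : (dfin.get? 0).isSome := by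
    rw [← PySem.Dict.contains_eq_isSome_get?]; exact hcontf
  obtain ⟨u, hu⟩ := Option.isSome_iff_exists.mp hsomef
  have humem := PySem.Dict.mem_items_of_get?_eq_some _ hu
  have huval : u ∈ dfin.values := List.mem_map.mpr ⟨(0, u), humem, rfl⟩
  cases hmx : PySem.List.max? dfin.values (fun x => x) with
  | none =>
    rw [PySem.List.max?_eq_none_iff] at hmx
    rw [hmx] at huval; exact absurd huval List.not_mem_nil
  | some m =>
    have hmmem : m ∈ dfin.values := PySem.List.max?_mem hmx
    obtain ⟨kv, hkvmem, hkv2⟩ := List.mem_map.mp hmmem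
    have hmle := hub kv hkvmem
    have hmv : pvMaxA dfin = m := by unfold pvMaxA; rw [hmx]; rfl
    have hlb' := hlb
    rw [hmv] at hlb' ⊢
    omega

-- ===== VERDICT (by name: the statement is the Claim_ definition above) =====
theorem calculate_max_satisfaction_spec : Claim_equal_calculate_max_satisfaction := by
  intro datasets _ _
  unfold Spec_calculate_max_satisfaction calculate_max_satisfaction calculate_max_satisfaction_alt
  rw [PySem.List.foldl_append_singleton_eq_map, PySem.List.foldl_append_singleton_eq_map]
  simp only [List.nil_append]
  apply List.map_congr_left
  intro dataset _
  rw [PySem.List.foldl_append_singleton_eq_map]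
  simp only [List.nil_append]
  have hmask : (fun (guy : Int × Int × List (Int × Int)) =>
      (guy.2.1, guy.2.2.foldl (fun b se =>
        (PySem.List.pyRange se.1 se.2 1).foldl (fun b i => PySem.Int.bor b (2 ^ (i - 6).toNat)) b) 0))
      = fun (g : Int × Int × List (Int × Int)) => (g.2.1, pvMaskOf g.2.2) := rfl
  rw [hmask]
  refine pvDataset_eq _ ?_
  intro g hg
  obtain ⟨x, _, rfl⟩ := List.mem_map.mp hg
  exact pvMaskOf_nonneg _
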